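-- pv_equiv track=rewrite | github.com/JustLittleYeti/AdventOfCode2015 | 02_12.py | calculate_ribbon
-- ===== SOURCE A (Python) =====
-- def calculate_ribbon(measurements):
--     total_ribbon = 0
--     for tulpe in measurements:
--         l, w, h = tulpe
--         tulpe = list(tulpe)
--         side1 = min(tulpe)
--         tulpe.remove(side1)
--         side2 = min(tulpe)
--         bow=l*w*h
--         ribbon_per_present=bow+2*side1+2*side2
--         total_ribbon += ribbon_per_present
--     return total_ribbon
-- ===== SOURCE B (Python) =====
-- def calculate_ribbon(measurements):
--     # Pass 1: total volume (the bows).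
--     bows = sum(l * w * h for l, w, h in measurements)
--     # Pass 2: for each box the ribbon wrap is the smallest face perimeter,
--     # min over the three face perimeters 2*(l+w), 2*(l+h), 2*(w+h) --
--     # equal to twice the sum of the two smallest sides.
--     wraps = sum(min(2 * (l + w), 2 * (l + h), 2 * (w + h)) for l, w, h in measurements)
--     return bows + wraps
-- ===== Notes on version B (the rewrite author's own statement) =====
-- stated objective: alternative
-- what changed: Replaces the per-box min/remove/min extraction of the two smallest sides by taking the minimum of the three face perimeters 2*(l+w), 2*(l+h), 2*(w+h), and restructures the single accumulator loop into two staged summation passes (volumes, then wraps).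
import Mathlib
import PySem

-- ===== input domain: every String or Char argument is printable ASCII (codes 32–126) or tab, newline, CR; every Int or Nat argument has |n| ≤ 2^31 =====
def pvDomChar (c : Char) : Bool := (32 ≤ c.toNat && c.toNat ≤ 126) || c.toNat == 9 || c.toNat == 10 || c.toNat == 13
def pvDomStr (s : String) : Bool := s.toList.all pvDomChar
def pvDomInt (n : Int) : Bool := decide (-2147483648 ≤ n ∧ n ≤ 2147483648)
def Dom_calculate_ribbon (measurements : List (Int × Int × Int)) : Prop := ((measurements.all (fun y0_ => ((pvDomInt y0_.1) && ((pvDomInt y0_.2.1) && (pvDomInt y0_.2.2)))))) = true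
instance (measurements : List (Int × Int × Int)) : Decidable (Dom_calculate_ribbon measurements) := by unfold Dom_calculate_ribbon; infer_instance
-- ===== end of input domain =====

-- ===== PORT A =====
-- B sums the boxes in two staged passes and takes the minimum face perimeter
-- instead of extracting the two smallest sides; objective: alternative.
def calculate_ribbon (measurements : List (Int × Int × Int)) : Int :=
  measurements.foldl (fun total_ribbon tulpe =>
    let l := tulpe.1; let w := tulpe.2.1; let h := tulpe.2.2
    let t := [l, w, h]
    let side1 := (PySem.List.min? t (fun x => x)).getD 0      -- min of a nonempty list: getD never hit
    let t2 := (PySem.List.remove? t side1).getD []            -- side1 ∈ t: getD never hit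
    let side2 := (PySem.List.min? t2 (fun x => x)).getD 0
    let bow := l * w * h
    let ribbon_per_present := bow + 2 * side1 + 2 * side2
    total_ribbon + ribbon_per_present) 0

-- ===== PORT B =====
def calculate_ribbon_alt (measurements : List (Int × Int × Int)) : Int :=
  let bows := measurements.foldl (fun a t => a + t.1 * t.2.1 * t.2.2) 0
  let wraps := measurements.foldl (fun a t =>
    a + min (2 * (t.1 + t.2.1)) (min (2 * (t.1 + t.2.2)) (2 * (t.2.1 + t.2.2)))) 0
  bows + wraps

-- ===== PRECONDITION & SPEC =====
def Spec_calculate_ribbon (measurements : List (Int × Int × Int)) (out : Int) : Prop := out = calculate_ribbon_alt measurements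
instance (measurements : List (Int × Int × Int)) (out : Int) : Decidable (Spec_calculate_ribbon measurements out) := by unfold Spec_calculate_ribbon; infer_instance

-- ===== CLAIM (what is proved, stated in full; the proofs are below) =====
def Claim_equal_calculate_ribbon : Prop := ∀ (measurements : List (Int × Int × Int)), Dom_calculate_ribbon measurements → Spec_calculate_ribbon measurements (calculate_ribbon measurements)

-- ===== LEMMAS AND PROOFS =====
-- A's per-box ribbon (bow + twice the two smallest sides) equals volume plus the
-- minimum face perimeter.
theorem ribbon_step_eq (l w h : Int) :
    (l * w * h + 2 * (PySem.List.min? [l, w, h] fun x => x).getD 0 +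
      2 * (PySem.List.min?
            ((PySem.List.remove? [l, w, h]
                ((PySem.List.min? [l, w, h] fun x => x).getD 0)).getD []) fun x => x).getD 0) =
    l * w * h + min (2 * (l + w)) (min (2 * (l + h)) (2 * (w + h))) := by
  rw [PySem.List.min?_id_cons]
  simp only [List.foldl_cons, List.foldl_nil, Option.getD_some]
  by_cases e1 : l = min (min l w) h
  · rw [← e1, PySem.List.remove?_cons_self]
    simp only [Option.getD_some]
    rw [PySem.List.min?_id_cons]
    simp only [List.foldl_cons, List.foldl_nil, Option.getD_some]
    omega
  · rw [PySem.List.remove?_cons_of_ne _ (fun hc => e1 hc)]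
    by_cases e2 : w = min (min l w) h
    · rw [← e2, PySem.List.remove?_cons_self]
      simp only [Option.map_some, Option.getD_some]
      rw [PySem.List.min?_id_cons]
      simp only [List.foldl_cons, List.foldl_nil, Option.getD_some]
      omega
    · rw [PySem.List.remove?_cons_of_ne _ (fun hc => e2 hc)]
      have e3 : h = min (min l w) h := by omega
      rw [← e3, PySem.List.remove?_cons_self]
      simp only [Option.map_some, Option.getD_some]
      rw [PySem.List.min?_id_cons]
      simp only [List.foldl_cons, List.foldl_nil, Option.getD_some]
      omega

theorem fold_split (ms : List (Int × Int × Int)) :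
    ms.foldl (fun total_ribbon tulpe =>
      let l := tulpe.1; let w := tulpe.2.1; let h := tulpe.2.2
      let t := [l, w, h]
      let side1 := (PySem.List.min? t (fun x => x)).getD 0
      let t2 := (PySem.List.remove? t side1).getD []
      let side2 := (PySem.List.min? t2 (fun x => x)).getD 0
      let bow := l * w * h
      let ribbon_per_present := bow + 2 * side1 + 2 * side2
      total_ribbon + ribbon_per_present) 0 =
    ms.foldl (fun a t => a + t.1 * t.2.1 * t.2.2) 0 +
      ms.foldl (fun a t =>
        a + min (2 * (t.1 + t.2.1)) (min (2 * (t.1 + t.2.2)) (2 * (t.2.1 + t.2.2)))) 0 := by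
  induction ms using List.reverseRecOn with
  | nil => rfl
  | append_singleton t x ih =>
      simp only [List.foldl_append, List.foldl_cons, List.foldl_nil, ih]
      have := ribbon_step_eq x.1 x.2.1 x.2.2
      omega

theorem calculate_ribbon_eq_alt (ms : List (Int × Int × Int)) :
    calculate_ribbon ms = calculate_ribbon_alt ms :=
  fold_split ms

-- ===== VERDICT (by name: the statement is the Claim_ definition above) =====
theorem calculate_ribbon_spec : Claim_equal_calculate_ribbon :=
  fun ms _ => calculate_ribbon_eq_alt ms
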